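-- pv_equiv track=rewrite | github.com/code-study-classes/python-basics-mariiia8 | practice_package/loops.py | count_vowel_triplets
-- ===== SOURCE A (Python) =====
-- def count_vowel_triplets(text):
--     vowels = {'a', 'e', 'i', 'o', 'u', 'y'}
--     count = 0
--     text_lower = text.lower()
--
--     for i in range(len(text_lower) - 2):
--         if (text_lower[i] in vowels and
--             text_lower[i + 1] in vowels and
--             text_lower[i + 2] in vowels):
--             count += 1
--     return count
-- ===== SOURCE B (Python) =====
-- def count_vowel_triplets(text):
--     vowels = "aeiouy"
--     count = 0
--     streak = 0
--     for ch in text.lower():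
--         if ch in vowels:
--             streak += 1
--             if streak >= 3:
--                 count += 1
--         else:
--             streak = 0
--     return count
-- ===== Notes on version B (the rewrite author's own statement) =====
-- stated objective: faster
-- what changed: Replaces the per-index triple membership test over all windows with a single character scan maintaining a run-length streak of consecutive vowels (a run of length L contributes L-2 triplets).
import Mathlib
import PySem

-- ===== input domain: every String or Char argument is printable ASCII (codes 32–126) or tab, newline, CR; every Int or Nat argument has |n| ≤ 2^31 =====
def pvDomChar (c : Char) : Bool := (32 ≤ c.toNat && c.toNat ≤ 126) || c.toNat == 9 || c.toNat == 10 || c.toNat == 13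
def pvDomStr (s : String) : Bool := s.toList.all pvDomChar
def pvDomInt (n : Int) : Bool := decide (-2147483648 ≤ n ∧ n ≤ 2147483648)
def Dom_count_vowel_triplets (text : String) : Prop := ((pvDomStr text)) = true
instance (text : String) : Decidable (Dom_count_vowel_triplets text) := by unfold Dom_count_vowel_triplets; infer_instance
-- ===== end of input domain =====

-- B replaces the per-window triple membership test with a one-pass consecutive-vowel streak counter (constant-factor faster; same O(n)).


-- ===== PORT A =====
-- vowels = {'a','e','i','o','u','y'}
def pvVowelsA : PySem.Set Char := PySem.Set.ofList ['a', 'e', 'i', 'o', 'u', 'y']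

-- port of A: loop over i in range(len(text_lower) - 2), testing the three window characters
-- (indices i, i+1, i+2 are always in range there, so the pyGetD default ' ' is never used)
def count_vowel_triplets (text : String) : Int :=
  let text_lower := PySem.Chars.lower text.toList
  (PySem.List.pyRange 0 ((text_lower.length : Int) - 2) 1).foldl
    (fun count i =>
      if PySem.Set.contains pvVowelsA (PySem.List.pyGetD text_lower i ' ')
          && PySem.Set.contains pvVowelsA (PySem.List.pyGetD text_lower (i + 1) ' ')
          && PySem.Set.contains pvVowelsA (PySem.List.pyGetD text_lower (i + 2) ' ')
      then count + 1 else count) 0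

-- ===== PORT B =====
-- ch in "aeiouy" for a single character ch is exactly list membership of ch
def pvIsVowelB (ch : Char) : Bool := ['a', 'e', 'i', 'o', 'u', 'y'].contains ch

-- the for-loop of Source B: state (streak, count)
def pvLoopB : List Char → Int → Int → Int
  | [], _, count => count
  | ch :: rest, streak, count =>
    if pvIsVowelB ch then
      pvLoopB rest (streak + 1) (if streak + 1 ≥ 3 then count + 1 else count)
    else
      pvLoopB rest 0 count

def count_vowel_triplets_alt (text : String) : Int :=
  pvLoopB (PySem.Chars.lower text.toList) 0 0

-- ===== PRECONDITION & SPEC =====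
def Spec_count_vowel_triplets (text : String) (out : Int) : Prop := out = count_vowel_triplets_alt text
instance (text : String) (out : Int) : Decidable (Spec_count_vowel_triplets text out) := by unfold Spec_count_vowel_triplets; infer_instance

-- ===== CLAIM (what is proved, stated in full; the proofs are below) =====
def Claim_equal_count_vowel_triplets : Prop := ∀ (text : String), Dom_count_vowel_triplets text → Spec_count_vowel_triplets text (count_vowel_triplets text)

-- ===== LEMMAS AND PROOFS =====

-- proof-side reference count: number of all-vowel windows of length 3, structurally
def pvWin : List Char → Int
  | a :: b :: c :: r =>
    (if pvIsVowelB a && pvIsVowelB b && pvIsVowelB c then 1 else 0) + pvWin (b :: c :: r)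
  | _ => 0

lemma pvWin_false_cons (x : Char) (t : List Char) (hx : pvIsVowelB x = false) :
    pvWin (x :: t) = pvWin t := by
  match t with
  | [] => simp [pvWin]
  | [y] => simp [pvWin]
  | y :: z :: u => simp [pvWin, hx]

lemma pvWin_vowel_false_cons (a x : Char) (t : List Char)
    (hx : pvIsVowelB x = false) :
    pvWin (a :: x :: t) = pvWin t := by
  match t with
  | [] => simp [pvWin]
  | y :: u => simp [pvWin, hx, pvWin_false_cons x (y :: u) hx]

-- the streak only matters through "is it ≥ 2"
lemma pvLoopB_streak_ge_two (cs : List Char) :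
    ∀ (s1 s2 c : Int), 2 ≤ s1 → 2 ≤ s2 → pvLoopB cs s1 c = pvLoopB cs s2 c := by
  induction cs with
  | nil => intro s1 s2 c _ _; rfl
  | cons x t ih =>
    intro s1 s2 c h1 h2
    by_cases hx : pvIsVowelB x = true
    · simp only [pvLoopB, hx, if_pos, if_pos (by omega : (3:Int) ≤ s1 + 1),
        if_pos (by omega : (3:Int) ≤ s2 + 1)]
      exact ih (s1 + 1) (s2 + 1) (c + 1) (by omega) (by omega)
    · simp [pvLoopB, hx]

-- main invariant of B's streak loop, with virtual vowel prefixes for streak 1 and 2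
lemma pvLoopB_win (cs : List Char) :
    (∀ c : Int, pvLoopB cs 0 c = c + pvWin cs) ∧
    (∀ (c : Int) (a : Char), pvIsVowelB a = true → pvLoopB cs 1 c = c + pvWin (a :: cs)) ∧
    (∀ (c : Int) (a b : Char), pvIsVowelB a = true → pvIsVowelB b = true →
      pvLoopB cs 2 c = c + pvWin (a :: b :: cs)) := by
  induction cs with
  | nil =>
    refine ⟨fun c => by simp [pvLoopB, pvWin], fun c a _ => by simp [pvLoopB, pvWin],
      fun c a b _ _ => by simp [pvLoopB, pvWin]⟩
  | cons x t ih =>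
    obtain ⟨h0, h1, h2⟩ := ih
    by_cases hx : pvIsVowelB x = true
    · refine ⟨fun c => ?_, fun c a ha => ?_, fun c a b ha hb => ?_⟩
      · simp only [pvLoopB, hx, if_pos, if_neg (by omega : ¬ (3:Int) ≤ 0 + 1)]
        exact h1 c x hx
      · simp only [pvLoopB, hx, if_pos, if_neg (by omega : ¬ (3:Int) ≤ 1 + 1)]
        rw [(by norm_num : (1:Int) + 1 = 2), h2 c a x ha hx]
      · simp only [pvLoopB, hx, if_pos, if_pos (by omega : (3:Int) ≤ 2 + 1)]
        rw [(by norm_num : (2:Int) + 1 = 3),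
          pvLoopB_streak_ge_two t 3 2 (c + 1) (by omega) (by omega),
          h2 (c + 1) b x hb hx]
        simp only [pvWin, ha, hb, hx, Bool.and_self, if_pos]
        ring
    · rw [Bool.not_eq_true] at hx
      refine ⟨fun c => ?_, fun c a ha => ?_, fun c a b ha hb => ?_⟩
      · simp only [pvLoopB, hx, Bool.false_eq_true, if_neg, not_false_iff]
        rw [h0 c, pvWin_false_cons x t hx]
      · simp only [pvLoopB, hx, Bool.false_eq_true, if_neg, not_false_iff]
        rw [h0 c, pvWin_vowel_false_cons a x t hx]
      · simp only [pvLoopB, hx, Bool.false_eq_true, if_neg, not_false_iff]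
        rw [h0 c]
        have : pvWin (a :: b :: x :: t) = pvWin (b :: x :: t) + 0 := by
          simp [pvWin, hx]
        rw [this, pvWin_vowel_false_cons b x t hx]
        ring

-- A's per-index window test, over Nat indices
def pvQ (cs : List Char) (j : Nat) : Bool :=
  pvIsVowelB (cs.getD j ' ') && pvIsVowelB (cs.getD (j + 1) ' ') && pvIsVowelB (cs.getD (j + 2) ' ')

lemma pvQ_shift (x : Char) (t : List Char) (j : Nat) : pvQ (x :: t) (j + 1) = pvQ t j := by
  simp [pvQ]

lemma pvCount_win : ∀ cs : List Char, ((List.range (cs.length - 2)).countP (pvQ cs) : Int) = pvWin cs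
  | [] => by simp [pvWin]
  | [a] => by simp [pvWin]
  | [a, b] => by simp [pvWin]
  | a :: b :: c :: r => by
    have hlen : (a :: b :: c :: r).length - 2 = r.length + 1 := by simp
    rw [hlen, List.range_succ_eq_map, List.countP_cons, List.countP_map]
    have hq0 : pvQ (a :: b :: c :: r) 0 = (pvIsVowelB a && pvIsVowelB b && pvIsVowelB c) := by
      simp [pvQ]
    have hsh : (List.range r.length).countP (pvQ (a :: b :: c :: r) ∘ Nat.succ)
        = (List.range r.length).countP (pvQ (b :: c :: r)) := by
      apply List.countP_congr
      intro j _
      simp only [Function.comp_apply, Nat.succ_eq_add_one, pvQ_shift]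
    have hIH : ((List.range ((b :: c :: r).length - 2)).countP (pvQ (b :: c :: r)) : Int)
        = pvWin (b :: c :: r) := pvCount_win (b :: c :: r)
    simp only [List.length_cons] at hIH
    rw [hsh]
    simp only [pvWin, hq0]
    rcases h : pvIsVowelB a && pvIsVowelB b && pvIsVowelB c with _ | _ <;>
      simp [← hIH]; try ring

-- A's vowel test equals B's
lemma pvVowel_eq (ch : Char) : PySem.Set.contains pvVowelsA ch = pvIsVowelB ch := by
  rfl

-- A's fold equals pvWin on any character list
lemma pvA_win (cs : List Char) :
    (PySem.List.pyRange 0 ((cs.length : Int) - 2) 1).foldl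
      (fun count i =>
        if PySem.Set.contains pvVowelsA (PySem.List.pyGetD cs i ' ')
            && PySem.Set.contains pvVowelsA (PySem.List.pyGetD cs (i + 1) ' ')
            && PySem.Set.contains pvVowelsA (PySem.List.pyGetD cs (i + 2) ' ')
        then count + 1 else count) 0 = pvWin cs := by
  rw [PySem.List.foldl_if_add_one]
  rw [PySem.List.pyRange_one]
  rw [List.countP_map]
  have hcast : ((((cs.length : Int) - 2 - 0).toNat)) = cs.length - 2 := by omega
  rw [hcast, ← pvCount_win cs, zero_add]
  congr 1
  apply List.countP_congr
  intro j hj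
  simp only [Function.comp_apply, zero_add, pvVowel_eq, pvQ]
  have h1 : ((j : Int) + 1) = ((j + 1 : Nat) : Int) := by push_cast; ring
  have h2 : ((j : Int) + 2) = ((j + 2 : Nat) : Int) := by push_cast; ring
  rw [h1, h2]
  simp only [PySem.List.pyGetD_natCast]

-- ===== VERDICT (by name: the statement is the Claim_ definition above) =====
theorem count_vowel_triplets_spec : Claim_equal_count_vowel_triplets := by
  intro text _
  unfold Spec_count_vowel_triplets count_vowel_triplets count_vowel_triplets_alt
  rw [(pvLoopB_win (PySem.Chars.lower text.toList)).1 0]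
  simp only [zero_add]
  exact pvA_win (PySem.Chars.lower text.toList)
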